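-- pv_equiv track=rewrite | github.com/meerapprasad/circuitree | adaptation-circuits/enumerate_topologies.py | generate_topologies_with_optional_pairs
-- ===== SOURCE A (Python) =====
-- from itertools import product, permutations
--
-- def generate_topologies_with_optional_pairs(nodes, actions):
--     """
--     Generate all possible topologies given a list of nodes and a set of actions, including an option for no interaction.
--
--     Parameters:
--     nodes (list): List of node names (strings).
--     actions (set): Set of action characters (strings), where "None" indicates no interaction.
--
--     Returns:
--     list: List of all topology configurations as strings.
--     """
--     # Generate all possible pairs of nodes, including repeated pairs (self-loops)
--     node_pairs = permutations(nodes, 2)  # Pairs where order matters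
--     all_pairs = list(node_pairs) + [(node, node) for node in nodes]  # Including repeated pairs
--
--     # Generate all combinations of actions for the given pairs
--     all_combinations = product(actions, repeat=len(all_pairs))
--
--     # Create formatted strings representing each topology, excluding "None" interactions
--     topologies = []
--     for combination in all_combinations:
--         topology = '_'.join([
--             f"{src}{dst}{action}"
--             for (src, dst), action in zip(all_pairs, combination)
--             if action != "None"
--         ])
--         topologies.append(topology)
--
--     return topologies
-- ===== SOURCE B (Python) =====
-- from itertools import permutations
--
-- def generate_topologies_with_optional_pairs(nodes, actions):
--     all_pairs = list(permutations(nodes, 2)) + [(node, node) for node in nodes]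
--     # Dynamic programming right-to-left: suffix_lists holds, for the pairs processed so
--     # far, every possible list of emitted pieces, in the order the actions enumerate.
--     suffix_lists = [[]]
--     for src, dst in reversed(all_pairs):
--         new = []
--         for action in actions:
--             if action != "None":
--                 piece = f"{src}{dst}{action}"
--                 new.extend([piece] + l for l in suffix_lists)
--             else:
--                 new.extend(suffix_lists)
--         suffix_lists = new
--     return ['_'.join(l) for l in suffix_lists]
-- ===== Notes on version B (the rewrite author's own statement) =====
-- stated objective: alternative
-- what changed: Replaces itertools.product over full action tuples plus per-tuple zip/filter/join with an iterative right-to-left dynamic program over the pair list that maintains the ordered list of suffix piece-lists, joining only at the end.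
import Mathlib
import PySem

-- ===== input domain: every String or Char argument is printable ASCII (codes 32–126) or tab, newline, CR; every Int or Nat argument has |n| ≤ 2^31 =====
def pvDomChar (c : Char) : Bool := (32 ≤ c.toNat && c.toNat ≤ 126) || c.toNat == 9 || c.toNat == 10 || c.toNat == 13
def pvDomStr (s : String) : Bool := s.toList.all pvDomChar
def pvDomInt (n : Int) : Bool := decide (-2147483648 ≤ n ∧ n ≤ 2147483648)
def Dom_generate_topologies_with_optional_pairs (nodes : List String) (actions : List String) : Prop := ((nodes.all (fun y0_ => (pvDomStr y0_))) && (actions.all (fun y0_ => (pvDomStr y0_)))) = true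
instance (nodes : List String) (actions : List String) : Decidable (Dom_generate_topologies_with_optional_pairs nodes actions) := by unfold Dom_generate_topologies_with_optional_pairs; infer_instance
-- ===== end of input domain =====

-- B replaces the materialised product over action tuples by a backtracking recursion over the
-- pair list with an accumulator of emitted pieces (alternative decomposition, same cost).

-- ===== PORT A =====
-- all_pairs = list(permutations(nodes, 2)) + [(node, node) for node in nodes]  (shared by both ports)
def pvAllPairs (nodes : List String) : List (List String) :=
  PySem.List.permutations nodes 2 ++ nodes.map (fun node => [node, node])

-- f"{src}{dst}{action}" for a pair (always a 2-element list here)  (shared by both ports)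
def pvPairStr (p : List String) (action : String) : String :=
  match p with
  | src :: dst :: _ => src ++ dst ++ action
  | _ => action

-- product(actions, repeat=k): leftmost component varies slowest
def pvCombos (actions : List String) : Nat → List (List String)
  | 0 => [[]]
  | n + 1 => actions.flatMap (fun a => (pvCombos actions n).map (fun c => a :: c))

def generate_topologies_with_optional_pairs (nodes : List String) (actions : List String) : List String :=
  let all_pairs := pvAllPairs nodes
  let all_combinations := pvCombos actions all_pairs.length
  -- for combination in all_combinations: append '_'.join([piece for ... if action != "None"])
  all_combinations.map (fun combination =>
    PySem.Str.join "_" ((all_pairs.zip combination).filterMap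
      (fun pa => if pa.2 != "None" then some (pvPairStr pa.1 pa.2) else none)))

-- ===== PORT B =====
-- one DP step: extend every suffix piece-list with the current pair under every action
def pvStepB (actions : List String) (p : List String) (suffix_lists : List (List String)) : List (List String) :=
  actions.flatMap (fun action =>
    if action != "None" then suffix_lists.map (fun l => pvPairStr p action :: l)
    else suffix_lists)

def generate_topologies_with_optional_pairs_alt (nodes : List String) (actions : List String) : List String :=
  let all_pairs := pvAllPairs nodes
  -- for src, dst in reversed(all_pairs): suffix_lists = step(...)
  let suffix_lists := all_pairs.reverse.foldl (fun acc p => pvStepB actions p acc) [[]]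
  suffix_lists.map (fun l => PySem.Str.join "_" l)

-- ===== PRECONDITION & SPEC =====
def Spec_generate_topologies_with_optional_pairs (nodes : List String) (actions : List String) (out : List String) : Prop := out = generate_topologies_with_optional_pairs_alt nodes actions
instance (nodes : List String) (actions : List String) (out : List String) : Decidable (Spec_generate_topologies_with_optional_pairs nodes actions out) := by unfold Spec_generate_topologies_with_optional_pairs; infer_instance

-- ===== CLAIM (what is proved, stated in full; the proofs are below) =====
def Claim_equal_generate_topologies_with_optional_pairs : Prop := ∀ (nodes : List String) (actions : List String), Dom_generate_topologies_with_optional_pairs nodes actions → Spec_generate_topologies_with_optional_pairs nodes actions (generate_topologies_with_optional_pairs nodes actions)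

-- ===== LEMMAS AND PROOFS =====
-- The right-to-left DP over the pair list produces exactly the filtered piece lists of
-- all action combinations, in product order.
theorem pvFoldr_eq (actions : List String) (pairs : List (List String)) :
    pairs.foldr (fun p acc => pvStepB actions p acc) [[]] =
      (pvCombos actions pairs.length).map (fun c =>
        (pairs.zip c).filterMap
          (fun pa => if pa.2 != "None" then some (pvPairStr pa.1 pa.2) else none)) := by
  induction pairs with
  | nil => simp [pvCombos]
  | cons p rest ih =>
    rw [List.foldr_cons, ih]
    simp only [pvStepB, List.length_cons, pvCombos, List.map_flatMap]
    congr 1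
    funext a
    by_cases h : a = "None"
    · simp [h]
    · simp [h, List.map_map, Function.comp]

-- ===== VERDICT (by name: the statement is the Claim_ definition above) =====
theorem generate_topologies_with_optional_pairs_spec : Claim_equal_generate_topologies_with_optional_pairs := by
  intro nodes actions _
  unfold Spec_generate_topologies_with_optional_pairs
  simp [generate_topologies_with_optional_pairs, generate_topologies_with_optional_pairs_alt,
    List.foldl_reverse, pvFoldr_eq, List.map_map, Function.comp]
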